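-- pv_equiv track=rewrite | github.com/Xyzzyall/Socionics | diplom/socionics/Calculator.py | get_quadras_in_group
-- ===== SOURCE A (Python) =====
-- def get_quadras_in_group(group: tuple) -> tuple:
--     quadras = [0, 0, 0, 0]
--     for typ, num in enumerate(group):
--         if typ in range(0, 4):
--             quadras[0] += num
--         elif typ in range(4, 8):
--             quadras[1] += num
--         elif typ in range(8, 12):
--             quadras[2] += num
--         else:
--             quadras[3] += num
--     return tuple(quadras)
-- ===== SOURCE B (Python) =====
-- def get_quadras_in_group(group: tuple) -> tuple:
--     return (sum(group[0:4]), sum(group[4:8]), sum(group[8:12]), sum(group[12:]))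
-- ===== Notes on version B (the rewrite author's own statement) =====
-- stated objective: simpler
-- what changed: Replaced the single enumerate loop with an if/elif index-range dispatch by four independent fixed-slice sums returned directly as a tuple.
import Mathlib
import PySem

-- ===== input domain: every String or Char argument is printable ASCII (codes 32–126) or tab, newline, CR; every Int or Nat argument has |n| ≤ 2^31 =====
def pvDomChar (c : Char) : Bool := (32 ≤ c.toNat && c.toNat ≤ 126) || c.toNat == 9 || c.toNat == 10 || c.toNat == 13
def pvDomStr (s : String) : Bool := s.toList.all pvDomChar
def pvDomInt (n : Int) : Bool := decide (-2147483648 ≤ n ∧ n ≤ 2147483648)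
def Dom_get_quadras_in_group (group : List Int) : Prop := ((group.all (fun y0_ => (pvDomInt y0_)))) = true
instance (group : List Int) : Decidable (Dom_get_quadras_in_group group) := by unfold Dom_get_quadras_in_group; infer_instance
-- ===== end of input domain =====

-- B replaces the enumerate loop with an if/elif chain by four fixed-slice sums (simpler decomposition).

-- ===== PORT A =====
-- one loop step: dispatch num into a bucket by the index typ (the four-element list is a 4-tuple state)
def quadStep (q : Int × Int × Int × Int) (p : Int × Int) : Int × Int × Int × Int :=
  if 0 ≤ p.1 ∧ p.1 < 4 then (q.1 + p.2, q.2.1, q.2.2.1, q.2.2.2)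
  else if 4 ≤ p.1 ∧ p.1 < 8 then (q.1, q.2.1 + p.2, q.2.2.1, q.2.2.2)
  else if 8 ≤ p.1 ∧ p.1 < 12 then (q.1, q.2.1, q.2.2.1 + p.2, q.2.2.2)
  else (q.1, q.2.1, q.2.2.1, q.2.2.2 + p.2)

def get_quadras_in_group (group : List Int) : Int × Int × Int × Int :=
  (PySem.List.enumerate group 0).foldl quadStep (0, 0, 0, 0)

-- ===== PORT B =====
def get_quadras_in_group_alt (group : List Int) : Int × Int × Int × Int :=
  ((PySem.List.slice group (some 0) (some 4)).sum,
   (PySem.List.slice group (some 4) (some 8)).sum,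
   (PySem.List.slice group (some 8) (some 12)).sum,
   (PySem.List.slice group (some 12) none).sum)

-- ===== PRECONDITION & SPEC =====
def Spec_get_quadras_in_group (group : List Int) (out : Int × Int × Int × Int) : Prop := out = get_quadras_in_group_alt group
instance (group : List Int) (out : Int × Int × Int × Int) : Decidable (Spec_get_quadras_in_group group out) := by unfold Spec_get_quadras_in_group; infer_instance

-- ===== CLAIM (what is proved, stated in full; the proofs are below) =====
def Claim_equal_get_quadras_in_group : Prop := ∀ (group : List Int), Dom_get_quadras_in_group group → Spec_get_quadras_in_group group (get_quadras_in_group group)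

-- ===== LEMMAS AND PROOFS =====

-- once the index reaches 12, every remaining element goes to the fourth bucket
theorem foldl_quadStep_ge12 (l : List Int) (s : Int) (h : 12 ≤ s) (q : Int × Int × Int × Int) :
    (PySem.List.enumerate l s).foldl quadStep q = (q.1, q.2.1, q.2.2.1, q.2.2.2 + l.sum) := by
  induction l generalizing s q with
  | nil => simp [PySem.List.enumerate_nil]
  | cons x t ih =>
      have h0 : ¬(0 ≤ s ∧ s < 4) := by omega
      have h1 : ¬(4 ≤ s ∧ s < 8) := by omega
      have h2 : ¬(8 ≤ s ∧ s < 12) := by omega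
      rw [PySem.List.enumerate_cons, List.foldl_cons, ih (s + 1) (by omega)]
      simp [quadStep, h0, h1, h2, add_assoc]

theorem get_quadras_in_group_spec : Claim_equal_get_quadras_in_group := by
  intro group _
  show get_quadras_in_group group = get_quadras_in_group_alt group
  rcases group with _ | ⟨a0, _ | ⟨a1, _ | ⟨a2, _ | ⟨a3, _ | ⟨a4, _ | ⟨a5, _ | ⟨a6, _ | ⟨a7,
    _ | ⟨a8, _ | ⟨a9, _ | ⟨a10, _ | ⟨a11, t⟩⟩⟩⟩⟩⟩⟩⟩⟩⟩⟩⟩ <;>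
    simp [get_quadras_in_group, get_quadras_in_group_alt, PySem.List.enumerate_cons,
      PySem.List.enumerate_nil, quadStep, PySem.List.slice, PySem.List.clampIdx,
      foldl_quadStep_ge12 _ 12 (by omega)] <;> omega

-- ===== VERDICT (by name: the statement is the Claim_ definition above) =====
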